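-- pv_equiv track=rewrite | github.com/va64doman/codility | L2-Arrays/oddOccurencesInArray.py | ooia
-- ===== SOURCE A (Python) =====
-- def ooia(A):
--     # If there is only one element, then return this element.
--     if len(A) == 1:
--         return A[0]
--     # Array sorted in ascending order.
--     A.sort()
--     # Group in pairs and check if there is a difference in pair.
--     for i in range(0, len(A) - 1, 2):
--         # If the two elements are different, then return the left element.
--         if A[i] != A[i+1]:
--             return A[i]
--     # If the length of the array is even, then show that there is no odd occurences.
--     # If reach to the end of the array and the length of array is odd, then the last element is odd occurence.
--     if len(A) % 2 == 0:
--         return -1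
--     else:
--         return A[-1]
--     pass
-- ===== SOURCE B (Python) =====
-- def ooia(A):
--     # Run-length scan over the sorted array: return the key of the first run
--     # of odd length, -1 if every run has even length. Sorts A in place like A.
--     A.sort()
--     i, n = 0, len(A)
--     while i < n:
--         j = i
--         while j < n and A[j] == A[i]:
--             j += 1
--         if (j - i) % 2 == 1:
--             return A[i]
--         i = j
--     return -1
-- ===== Notes on version B (the rewrite author's own statement) =====
-- stated objective: alternative
-- what changed: Replaces the len==1 special case and the stride-2 pairwise comparison over range(0,len-1,2) with a run-length scan of the sorted array that returns the key of the first odd-length run (-1 if none); same sort, same O(n log n) cost.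
import Mathlib
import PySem

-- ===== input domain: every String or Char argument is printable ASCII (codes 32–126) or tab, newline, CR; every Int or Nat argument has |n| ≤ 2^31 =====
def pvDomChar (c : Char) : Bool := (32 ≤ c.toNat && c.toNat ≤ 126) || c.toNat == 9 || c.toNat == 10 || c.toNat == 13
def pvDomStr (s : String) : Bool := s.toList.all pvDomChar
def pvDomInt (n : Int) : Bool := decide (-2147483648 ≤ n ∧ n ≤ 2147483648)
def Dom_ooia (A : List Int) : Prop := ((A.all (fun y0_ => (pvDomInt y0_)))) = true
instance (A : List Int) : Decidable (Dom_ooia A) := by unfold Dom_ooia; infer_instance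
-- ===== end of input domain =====

-- B replaces A's stride-2 pairwise comparison with a run-length scan of the sorted
-- array (alternative decomposition, same cost). Both A and B sort their argument in
-- place in Python; the equivalence proved here is about the return value.

-- ===== PORT A =====
-- A's for-loop over range(0, len(A)-1, 2); the for-else tail (even length → -1,
-- odd → A[-1]) is the base case of the loop recursion.
def ooiaLoop (s : List Int) : List Int → Int
  | [] => if PySem.Int.mod (PySem.List.len s) 2 = 0 then -1 else PySem.List.pyGetD s (-1) 0
  | i :: rest =>
      if PySem.List.pyGetD s i 0 ≠ PySem.List.pyGetD s (i + 1) 0 then PySem.List.pyGetD s i 0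
      else ooiaLoop s rest

def ooia (A : List Int) : Int :=
  if PySem.List.len A = 1 then PySem.List.pyGetD A 0 0
  else
    let s := PySem.List.sorted A (fun x => x) false
    ooiaLoop s (PySem.List.pyRange 0 (PySem.List.len s - 1) 2)

-- ===== PORT B =====
-- B's outer while-loop: one step strips the run of the head element (the inner
-- while-loop counting the run is takeWhile/dropWhile on the tail).
def runScan : List Int → Int
  | [] => -1
  | x :: rest =>
      if (1 + (rest.takeWhile (fun z => z == x)).length) % 2 = 1 then x
      else runScan (rest.dropWhile (fun z => z == x))
  termination_by l => l.length
  decreasing_by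
    simpa using Nat.lt_succ_of_le (List.length_dropWhile_le (fun z => z == x) rest)

def ooia_alt (A : List Int) : Int := runScan (PySem.List.sorted A (fun x => x) false)

-- ===== PRECONDITION & SPEC =====
def Spec_ooia (A : List Int) (out : Int) : Prop := out = ooia_alt A
instance (A : List Int) (out : Int) : Decidable (Spec_ooia A out) := by unfold Spec_ooia; infer_instance

-- ===== CLAIM (what is proved, stated in full; the proofs are below) =====
def Claim_equal_ooia : Prop := ∀ (A : List Int), Dom_ooia A → Spec_ooia A (ooia A)

-- ===== LEMMAS AND PROOFS =====

-- step-2 range induction forms (derived from PySem.List.pyRange_of_pos)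
theorem pyRange_two_nil (a b : Int) (h : b ≤ a) : PySem.List.pyRange a b 2 = [] := by
  rw [PySem.List.pyRange_of_pos a b (by norm_num)]
  simp [if_neg (not_lt.mpr h)]

theorem pyRange_two_shift (b : Int) :
    PySem.List.pyRange 2 b 2 = (PySem.List.pyRange 0 (b - 2) 2).map (fun i => i + 2) := by
  rw [PySem.List.pyRange_of_pos 2 b (by norm_num),
      PySem.List.pyRange_of_pos 0 (b - 2) (by norm_num), List.map_map]
  have hcnt : (if (2:Int) < b then ((b - 2 + 2 - 1) / 2).toNat else 0)
      = (if (0:Int) < b - 2 then ((b - 2 - 0 + 2 - 1) / 2).toNat else 0) := by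
    split_ifs <;> omega
  rw [hcnt]
  exact List.map_congr_left (fun k _ => by simp [Function.comp]; ring)

theorem pyRange_two_cons (b : Int) (h : 0 < b) :
    PySem.List.pyRange 0 b 2 = 0 :: PySem.List.pyRange 2 b 2 := by
  rw [PySem.List.pyRange_of_pos 0 b (by norm_num),
      PySem.List.pyRange_of_pos 2 b (by norm_num)]
  have hc1 : (if (0:Int) < b then ((b - 0 + 2 - 1) / 2).toNat else 0)
      = (if (2:Int) < b then ((b - 2 + 2 - 1) / 2).toNat else 0) + 1 := by
    split_ifs <;> omega
  rw [hc1, List.range_succ_eq_map, List.map_cons, List.map_map]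
  refine congrArg₂ _ (by norm_num) ?_
  exact List.map_congr_left (fun k _ => by simp [Function.comp]; ring)

-- indices shifted by 2 read the tail two elements in
theorem ooiaLoop_shift (x y : Int) (t : List Int) :
    ∀ l : List Int, (∀ i ∈ l, 0 ≤ i) →
      ooiaLoop (x :: y :: t) (l.map (fun i => i + 2)) = ooiaLoop t l := by
  intro l
  induction l with
  | nil =>
      intro _
      simp only [List.map_nil, ooiaLoop, PySem.List.len_eq]
      rcases List.eq_nil_or_concat t with rfl | ⟨u, z, rfl⟩
      · norm_num [PySem.Int.mod]
      · simp only [List.concat_eq_append]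
        have hpar : PySem.Int.mod ((x :: y :: (u ++ [z])).length : Int) 2
            = PySem.Int.mod ((u ++ [z]).length : Int) 2 := by
          simp only [List.length_cons, List.length_append]
          rw [PySem.Int.mod_eq_emod_of_pos (by norm_num),
              PySem.Int.mod_eq_emod_of_pos (by norm_num)]
          omega
        rw [hpar]
        have h1 : PySem.List.pyGetD (x :: y :: (u ++ [z])) (-1) 0 = z := by
          have := PySem.List.pyGetD_neg_one_append_singleton (x :: y :: u) z (0:Int)
          simpa using this
        have h2 : PySem.List.pyGetD (u ++ [z]) (-1) 0 = z :=
          PySem.List.pyGetD_neg_one_append_singleton u z 0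
        rw [h1, h2]

  | cons i l ih =>
      intro hmem
      have hi : 0 ≤ i := hmem i (by simp)
      simp only [List.map_cons, ooiaLoop]
      have hg : ∀ j : Int, 0 ≤ j → PySem.List.pyGetD (x :: y :: t) (j + 2) 0 = PySem.List.pyGetD t j 0 := by
        intro j hj
        have hjn : j = ((j.toNat : Nat) : Int) := by omega
        rw [hjn]
        have h2 : ((j.toNat : Nat) : Int) + 2 = ((j.toNat + 2 : Nat) : Int) := by push_cast; ring
        rw [h2, PySem.List.pyGetD_natCast, PySem.List.pyGetD_natCast]
        simp [List.getD]
      have e1 := hg i hi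
      have e2 : PySem.List.pyGetD (x :: y :: t) (i + 2 + 1) 0 = PySem.List.pyGetD t (i + 1) 0 := by
        have : i + 2 + 1 = (i + 1) + 2 := by ring
        rw [this]; exact hg (i + 1) (by omega)
      rw [e1, e2, ih (fun j hj => hmem j (by simp [hj]))]

-- collapsing one equal pair at the head does not change the run scan
theorem runScan_cons_cons (x : Int) (t : List Int) : runScan (x :: x :: t) = runScan t := by
  cases t with
  | nil => simp [runScan]
  | cons z u =>
      by_cases hz : z = x
      · subst hz
        rw [runScan, runScan]
        simp only [List.takeWhile_cons, BEq.rfl, if_pos, List.dropWhile_cons, List.length_cons]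
        by_cases hodd : (1 + (u.takeWhile (fun w => w == z)).length) % 2 = 1
        · rw [if_pos (by omega), if_pos (by omega)]
        · rw [if_neg (by omega), if_neg (by omega)]
      · have hzx : (z == x) = false := by simp [hz]
        rw [runScan]
        simp only [List.takeWhile_cons, BEq.rfl, if_pos, hzx, List.dropWhile_cons, List.length_cons]
        norm_num

-- the central fact: A's pair loop over the sorted list computes B's run scan
theorem loop_eq : ∀ s : List Int,
    ooiaLoop s (PySem.List.pyRange 0 ((s.length : Int) - 1) 2) = runScan s
  | [] => by
      rw [pyRange_two_nil 0 _ (by simp)]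
      simp [ooiaLoop, runScan, PySem.Int.mod]
  | [x] => by
      rw [pyRange_two_nil 0 _ (by simp)]
      simp only [ooiaLoop, PySem.List.len_eq, List.length_cons, List.length_nil]
      rw [if_neg (by decide)]
      rw [PySem.List.pyGetD_neg_one [x] 0 (by simp)]
      simp [runScan]
  | x :: y :: t => by
      have hb : (0:Int) < ((x :: y :: t).length : Int) - 1 := by simp only [List.length_cons]; omega
      rw [pyRange_two_cons _ hb, pyRange_two_shift]
      rw [ooiaLoop]
      have gx : PySem.List.pyGetD (x :: y :: t) 0 0 = x := PySem.List.pyGetD_zero_cons _ _ _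
      have gy : PySem.List.pyGetD (x :: y :: t) (0 + 1) 0 = y := by
        have : (0:Int) + 1 = ((1:Nat) : Int) := by norm_num
        rw [this, PySem.List.pyGetD_natCast]; rfl
      rw [gx, gy]
      by_cases hxy : x = y
      · subst hxy
        rw [if_neg (by simp)]
        have hshift := ooiaLoop_shift x x t
          (PySem.List.pyRange 0 (((x :: x :: t).length : Int) - 1 - 2) 2)
          (fun i hi => ((PySem.List.mem_pyRange_iff_of_pos (by norm_num) i).mp hi).1)
        have hlen : ((x :: x :: t).length : Int) - 1 - 2 = ((t.length : Int) - 1) := by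
          simp; omega
        rw [hshift, hlen, loop_eq t, runScan_cons_cons]
      · rw [if_pos hxy]
        rw [runScan]
        have hzx : (y == x) = false := by simp [Ne.symm hxy]
        simp [hzx]
  termination_by s => s.length

-- a one-element list is already sorted
theorem sorted_singleton (a : Int) :
    PySem.List.sorted [a] (fun x => x) false = [a] :=
  PySem.List.sorted_eq_self_of_pairwise _ _ (by simp)

-- ===== VERDICT (by name: the statement is the Claim_ definition above) =====
theorem ooia_spec : Claim_equal_ooia := by
  intro A _
  unfold Spec_ooia ooia ooia_alt
  by_cases h1 : PySem.List.len A = 1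
  · rw [if_pos h1]
    have : A.length = 1 := by simpa [PySem.List.len_eq] using h1
    obtain ⟨a, rfl⟩ : ∃ a, A = [a] := by
      cases A with
      | nil => simp at this
      | cons a t => cases t with
        | nil => exact ⟨a, rfl⟩
        | cons b u => simp at this
    rw [sorted_singleton]
    simp [runScan]
  · rw [if_neg h1]
    simp only [PySem.List.len_eq]
    exact loop_eq _
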